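-- pv_equiv track=rewrite | github.com/bashtavenko/py_snippets | strings/string_mirror.py | is_mirror_palindrome
-- ===== SOURCE A (Python) =====
-- def is_mirror_palindrome(s):
--   d = {'0': '0', '1': '1', '6': '9', '9': '6'}
--
--   for i in range(len(s) // 2):
--      first = s[i]
--      last = s[~i]
--      first_pair = d.get(first, None)
--      if last != first_pair:
--        return False
--
--   return True
-- ===== SOURCE B (Python) =====
-- def is_mirror_palindrome(s):
--   d = {'0': '0', '1': '1', '6': '9', '9': '6'}
--   half = len(s) // 2
--   mirrored = [d.get(c) for c in s]
--   return mirrored[::-1][:half] == list(s[:half])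
-- ===== Notes on version B (the rewrite author's own statement) =====
-- stated objective: alternative
-- what changed: Replaced the early-exit pairwise index loop with a bulk computation: map the mirror dict over the whole string once, then compare the reversed mapped list's first half against the string's first half in one list comparison (exact because the mirror map is an involution).
import Mathlib
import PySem

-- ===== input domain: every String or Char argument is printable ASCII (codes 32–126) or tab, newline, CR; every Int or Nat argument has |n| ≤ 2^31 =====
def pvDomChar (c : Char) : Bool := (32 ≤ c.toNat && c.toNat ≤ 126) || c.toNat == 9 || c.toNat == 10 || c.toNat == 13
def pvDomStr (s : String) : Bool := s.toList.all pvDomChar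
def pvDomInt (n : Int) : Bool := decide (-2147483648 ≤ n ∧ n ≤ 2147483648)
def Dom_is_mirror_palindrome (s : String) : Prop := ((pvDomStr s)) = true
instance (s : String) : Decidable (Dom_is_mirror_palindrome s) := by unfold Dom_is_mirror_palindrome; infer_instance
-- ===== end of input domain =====

-- B replaces A's early-exit pairwise index loop by one bulk list comparison of the
-- reversed dict-mapped sequence's first half against the string's first half (alternative decomposition, same cost).

-- ===== PORT A =====
-- the dict literal {'0':'0','1':'1','6':'9','9':'6'}
def mirrorDictA : PySem.Dict Char Char :=
  (((PySem.Dict.empty.insert '0' '0').insert '1' '1').insert '6' '9').insert '9' '6'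

-- A's for-loop with early return False, over the index list range(len(s)//2)
def mirrorLoopA (cs : List Char) : List Int → Bool
  | [] => true
  | i :: rest =>
    match PySem.List.pyGet? cs i, PySem.List.pyGet? cs (Int.not i) with
    | some first, some last =>
      let first_pair := PySem.Dict.get? mirrorDictA first
      if some last ≠ first_pair then false else mirrorLoopA cs rest
    | _, _ => false   -- unreachable: both indices are in range for i ∈ range(len//2)

def is_mirror_palindrome (s : String) : Bool :=
  let cs := s.toList
  mirrorLoopA cs (PySem.List.pyRange 0 (PySem.Int.floordiv (cs.length : Int) 2) 1)

-- ===== PORT B =====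
def mirrorDictB : PySem.Dict Char Char :=
  (((PySem.Dict.empty.insert '0' '0').insert '1' '1').insert '6' '9').insert '9' '6'

def is_mirror_palindrome_alt (s : String) : Bool :=
  let cs := s.toList
  let half := PySem.Int.floordiv (cs.length : Int) 2
  let mirrored := cs.map (fun c => PySem.Dict.get? mirrorDictB c)   -- [d.get(c) for c in s]
  -- mirrored[::-1][:half] == list(s[:half])  (list of Optional[str] vs list of str: real chars lifted with `some`)
  PySem.List.slice mirrored.reverse none (some half)
    == (PySem.List.slice cs none (some half)).map some

-- ===== PRECONDITION & SPEC =====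
def Spec_is_mirror_palindrome (s : String) (out : Bool) : Prop := out = is_mirror_palindrome_alt s
instance (s : String) (out : Bool) : Decidable (Spec_is_mirror_palindrome s out) := by unfold Spec_is_mirror_palindrome; infer_instance

-- ===== CLAIM (what is proved, stated in full; the proofs are below) =====
def Claim_equal_is_mirror_palindrome : Prop := ∀ (s : String), Dom_is_mirror_palindrome s → Spec_is_mirror_palindrome s (is_mirror_palindrome s)

-- ===== LEMMAS AND PROOFS =====

theorem get_mirrorDictA (a : Char) : PySem.Dict.get? mirrorDictA a =
    if a='9' then some '6' else if a='6' then some '9' else if a='1' then some '1' else if a='0' then some '0' else none := by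
  unfold mirrorDictA
  simp [PySem.Dict.get?_insert, pysem]

theorem get_mirrorDictB (b : Char) : PySem.Dict.get? mirrorDictB b = PySem.Dict.get? mirrorDictA b := rfl

-- the mirror dictionary is an involution
theorem mirrorDict_invol (a b : Char) :
    PySem.Dict.get? mirrorDictA a = some b ↔ PySem.Dict.get? mirrorDictB b = some a := by
  rw [get_mirrorDictB, get_mirrorDictA, get_mirrorDictA]
  split_ifs with h1 h2 h3 h4 <;> subst_vars <;> simp_all [eq_comm]

-- A's early-exit loop is the conjunction of the per-index checks
theorem mirrorLoopA_eq_all (cs : List Char) (l : List Int) :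
    mirrorLoopA cs l = l.all (fun i =>
      match PySem.List.pyGet? cs i, PySem.List.pyGet? cs (Int.not i) with
      | some first, some last => some last == PySem.Dict.get? mirrorDictA first
      | _, _ => false) := by
  induction l with
  | nil => rfl
  | cons i rest ih =>
    simp only [mirrorLoopA, List.all_cons]
    cases hf : PySem.List.pyGet? cs i <;> cases hl : PySem.List.pyGet? cs (Int.not i) <;>
      try exact (Bool.false_and _).symm
    case some.some f la =>
      by_cases h : some la = PySem.Dict.get? mirrorDictA f <;> simp [h, ih]

theorem not_natCast (k : Nat) : Int.not (k : Int) = -(((k+1 : Nat)) : Int) := by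
  simp [Int.not]; omega

-- A's loop checks exactly: for every k < len//2, d.get(s[k]) is s[n-1-k]
theorem sideA_iff (cs : List Char) (h : Nat) (hhn : h ≤ cs.length) :
    ((PySem.List.pyRange 0 (h : Int) 1).all (fun i =>
      match PySem.List.pyGet? cs i, PySem.List.pyGet? cs (Int.not i) with
      | some first, some last => some last == PySem.Dict.get? mirrorDictA first
      | _, _ => false)) = true ↔
    ∀ k, (hk : k < h) → PySem.Dict.get? mirrorDictA (cs[k]'(by omega)) =
      some (cs[cs.length - (k+1)]'(by omega)) := by
  rw [List.all_eq_true]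
  constructor
  · intro ha k hk
    have := ha (k : Int) (by rw [PySem.List.mem_pyRange_one]; constructor <;> omega)
    rw [not_natCast, PySem.List.pyGet?_natCast,
        PySem.List.pyGet?_neg_natCast cs (k+1) (by omega) (by omega),
        List.getElem?_eq_getElem (by omega : k < cs.length),
        List.getElem?_eq_getElem (by omega : cs.length - (k+1) < cs.length)] at this
    simp only [beq_iff_eq] at this
    exact this.symm
  · intro hp i hi
    rw [PySem.List.mem_pyRange_one] at hi
    obtain ⟨k, rfl⟩ : ∃ k : Nat, i = (k : Int) := ⟨i.toNat, by omega⟩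
    have hk : k < h := by omega
    rw [not_natCast, PySem.List.pyGet?_natCast,
        PySem.List.pyGet?_neg_natCast cs (k+1) (by omega) (by omega),
        List.getElem?_eq_getElem (by omega : k < cs.length),
        List.getElem?_eq_getElem (by omega : cs.length - (k+1) < cs.length)]
    simp only [beq_iff_eq]
    exact (hp k hk).symm

-- B's bulk comparison checks exactly: for every k < len//2, d.get(s[n-1-k]) is s[k]
theorem sideB_iff (cs : List Char) (h : Nat) (hhn : h ≤ cs.length) :
    ((cs.map (fun c => PySem.Dict.get? mirrorDictB c)).reverse.take h
        = (cs.take h).map some) ↔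
    ∀ k, (hk : k < h) → PySem.Dict.get? mirrorDictB (cs[cs.length - (k+1)]'(by omega)) =
      some (cs[k]'(by omega)) := by
  constructor
  · intro heq k hk
    have := congrArg (fun l => l[k]?) heq
    simp only [List.getElem?_take, hk, if_pos] at this
    rw [List.getElem?_eq_getElem (by simp; omega :
          k < (cs.map (fun c => PySem.Dict.get? mirrorDictB c)).reverse.length),
        List.getElem?_eq_getElem (by simp; omega : k < ((cs.take h).map some).length)] at this
    simp only [List.getElem_reverse, List.getElem_map, List.length_map, List.getElem_take] at this
    simpa [show cs.length - 1 - k = cs.length - (k+1) by omega] using this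
  · intro hp
    apply List.ext_getElem
    · simp
    · intro k hk1 hk2
      have hk : k < h := by simp at hk1; omega
      simp only [List.getElem_take, List.getElem_reverse, List.getElem_map, List.length_map]
      simp only [show cs.length - 1 - k = cs.length - (k+1) from by omega]
      exact hp k hk

-- ===== VERDICT (by name: the statement is the Claim_ definition above) =====
theorem is_mirror_palindrome_spec : Claim_equal_is_mirror_palindrome := by
  intro s _
  unfold Spec_is_mirror_palindrome is_mirror_palindrome is_mirror_palindrome_alt
  set cs := s.toList with hcs
  have hhalf : PySem.Int.floordiv (cs.length : Int) 2 = ((cs.length / 2 : Nat) : Int) := by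
    exact_mod_cast PySem.Int.floordiv_natCast cs.length 2
  have hhn : cs.length / 2 ≤ cs.length := Nat.div_le_self _ 2
  simp only [hhalf]
  rw [mirrorLoopA_eq_all,
      PySem.List.slice_to_natCast, PySem.List.slice_to_natCast]
  rw [Bool.eq_iff_iff, beq_iff_eq, sideA_iff cs _ hhn, sideB_iff cs _ hhn]
  constructor
  · intro ha k hk
    exact (mirrorDict_invol _ _).mp (ha k hk)
  · intro hb k hk
    exact (mirrorDict_invol _ _).mpr (hb k hk)
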